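-- pv_equiv track=rewrite | github.com/jotaelediaz/dondeestamitren | app/viewmodels/train_detail.py | _compute_stop_scope
-- ===== SOURCE A (Python) =====
-- from typing import Any
--
-- def _compute_stop_scope(stops: list[dict[str, Any]]) -> dict[str, dict[str, Any] | None]:
--     scope = {"current": None, "upcoming": None}
--     for stop in stops:
--         normalized = (stop.get("status") or stop.get("flag") or "").upper()
--         if scope["current"] is None and normalized == "CURRENT":
--             scope["current"] = stop
--         elif scope["upcoming"] is None and normalized in {"NEXT", "UPCOMING", "FUTURE"}:
--             scope["upcoming"] = stop
--         if scope["current"] and scope["upcoming"]: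
--             break
--     return scope
-- ===== SOURCE B (Python) =====
-- def _norm(stop):
--     return (stop.get("status") or stop.get("flag") or "").upper()
--
--
-- def _compute_stop_scope(stops):
--     current = next((s for s in stops if _norm(s) == "CURRENT"), None)
--     upcoming = next((s for s in stops if _norm(s) in {"NEXT", "UPCOMING", "FUTURE"}), None)
--     return {"current": current, "upcoming": upcoming}
-- ===== Notes on version B (the rewrite author's own statement) =====
-- stated objective: idiomatic
-- what changed: Replaces the single interleaved loop maintaining both slots with an early break by two independent first-match searches (next over a generator) with the normalization factored into a helper.
import Mathlib
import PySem

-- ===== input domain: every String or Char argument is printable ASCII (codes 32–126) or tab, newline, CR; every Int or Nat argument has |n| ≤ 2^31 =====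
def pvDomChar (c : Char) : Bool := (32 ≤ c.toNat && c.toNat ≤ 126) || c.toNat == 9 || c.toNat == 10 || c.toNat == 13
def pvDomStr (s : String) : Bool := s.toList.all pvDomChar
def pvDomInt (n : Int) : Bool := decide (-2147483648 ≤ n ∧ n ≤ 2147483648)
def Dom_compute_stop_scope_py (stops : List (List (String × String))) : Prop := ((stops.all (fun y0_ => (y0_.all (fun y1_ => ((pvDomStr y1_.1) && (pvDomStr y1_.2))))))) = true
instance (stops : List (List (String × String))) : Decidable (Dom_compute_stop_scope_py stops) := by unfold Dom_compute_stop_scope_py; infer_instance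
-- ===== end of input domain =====

-- B replaces A's single interleaved loop (two slots + early break) by two independent
-- first-match searches with the normalization factored into a helper (objective: idiomatic).

-- ===== PORT A =====
-- Python truthiness of scope["current"] / scope["upcoming"]: non-None and nonempty dict
def pvTruthyA (o : Option (List (String × String))) : Bool :=
  match o with
  | none => false
  | some l => !l.isEmpty

def pvLoopA : List (List (String × String)) →
    Option (List (String × String)) → Option (List (String × String)) →
    Option (List (String × String)) × Option (List (String × String))
  | [], c, u => (c, u)
  | stop :: rest, c, u =>
    -- normalized = (stop.get("status") or stop.get("flag") or "").upper()
    let s := PySem.Dict.getD (PySem.Dict.mk stop) "status" ""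
    let normalized := PySem.Str.upper (if s = "" then PySem.Dict.getD (PySem.Dict.mk stop) "flag" "" else s)
    let cu :=
      if c = none ∧ normalized = "CURRENT" then (some stop, u)
      else if u = none ∧ (normalized = "NEXT" ∨ normalized = "UPCOMING" ∨ normalized = "FUTURE") then
        (c, some stop)
      else (c, u)
    if pvTruthyA cu.1 ∧ pvTruthyA cu.2 then cu else pvLoopA rest cu.1 cu.2

def compute_stop_scope_py (stops : List (List (String × String))) : List (String × Option (List (String × String))) :=
  let cu := pvLoopA stops none none
  [("current", cu.1), ("upcoming", cu.2)]

-- ===== PORT B =====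
def pvNorm (stop : List (String × String)) : String :=
  let s := PySem.Dict.getD (PySem.Dict.mk stop) "status" ""
  PySem.Str.upper (if s = "" then PySem.Dict.getD (PySem.Dict.mk stop) "flag" "" else s)

def compute_stop_scope_py_alt (stops : List (List (String × String))) : List (String × Option (List (String × String))) :=
  let current := stops.find? (fun s => pvNorm s == "CURRENT")
  let upcoming := stops.find? (fun s => pvNorm s == "NEXT" || pvNorm s == "UPCOMING" || pvNorm s == "FUTURE")
  [("current", current), ("upcoming", upcoming)]

-- ===== PRECONDITION & SPEC =====
def Spec_compute_stop_scope_py (stops : List (List (String × String))) (out : List (String × Option (List (String × String)))) : Prop := out = compute_stop_scope_py_alt stops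
instance (stops : List (List (String × String))) (out : List (String × Option (List (String × String)))) : Decidable (Spec_compute_stop_scope_py stops out) := by unfold Spec_compute_stop_scope_py; infer_instance

-- ===== CLAIM (what is proved, stated in full; the proofs are below) =====
def Claim_equal_compute_stop_scope_py : Prop := ∀ (stops : List (List (String × String))), Dom_compute_stop_scope_py stops → Spec_compute_stop_scope_py stops (compute_stop_scope_py stops)

-- ===== LEMMAS AND PROOFS =====
theorem pvLoopA_eq (stops : List (List (String × String))) :
    ∀ c u, pvLoopA stops c u =
      (c.or (stops.find? (fun s => pvNorm s == "CURRENT")),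
       u.or (stops.find? (fun s => pvNorm s == "NEXT" || pvNorm s == "UPCOMING" || pvNorm s == "FUTURE"))) := by
  induction stops with
  | nil => intro c u; simp [pvLoopA]
  | cons stop rest ih =>
    intro c u
    have hfold : PySem.Str.upper (if PySem.Dict.getD (PySem.Dict.mk stop) "status" "" = "" then PySem.Dict.getD (PySem.Dict.mk stop) "flag" "" else PySem.Dict.getD (PySem.Dict.mk stop) "status" "") = pvNorm stop := rfl
    simp only [pvLoopA, List.find?_cons]
    rw [hfold]
    by_cases h1 : c = none ∧ pvNorm stop = "CURRENT"
    · have hcur : (pvNorm stop == "CURRENT") = true := by simp [h1.2]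
      have hup : (pvNorm stop == "NEXT" || pvNorm stop == "UPCOMING" || pvNorm stop == "FUTURE") = false := by
        simp [h1.2]
      rw [if_pos h1, hcur, hup]
      by_cases hb : pvTruthyA (some stop, u).1 = true ∧ pvTruthyA (some stop, u).2 = true
      · rw [if_pos hb]
        obtain ⟨m, hm⟩ : ∃ m, u = some m := by
          cases u with
          | none => exact absurd hb.2 (by simp [pvTruthyA])
          | some m => exact ⟨m, rfl⟩
        simp [h1.1, hm, Option.or]
      · rw [if_neg hb, ih]
        simp [h1.1, Option.or]
    · by_cases h2 : u = none ∧ (pvNorm stop = "NEXT" ∨ pvNorm stop = "UPCOMING" ∨ pvNorm stop = "FUTURE")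
      · have hup : (pvNorm stop == "NEXT" || pvNorm stop == "UPCOMING" || pvNorm stop == "FUTURE") = true := by
          rcases h2.2 with h | h | h <;> simp [h]
        have hcur : (pvNorm stop == "CURRENT") = false := by
          rcases h2.2 with h | h | h <;> simp [h]
        rw [if_neg h1, if_pos h2, hcur, hup]
        by_cases hb : pvTruthyA (c, some stop).1 = true ∧ pvTruthyA (c, some stop).2 = true
        · rw [if_pos hb]
          obtain ⟨m, hm⟩ : ∃ m, c = some m := by
            cases c with
            | none => exact absurd hb.1 (by simp [pvTruthyA])
            | some m => exact ⟨m, rfl⟩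
          simp [h2.1, hm, Option.or]
        · rw [if_neg hb, ih]
          simp [h2.1, Option.or]
      · have hcur : (pvNorm stop == "CURRENT") = false ∨ c ≠ none := by
          by_cases hc : c = none
          · left; simp only [hc, true_and] at h1; simp [h1]
          · right; exact hc
        have hup : (pvNorm stop == "NEXT" || pvNorm stop == "UPCOMING" || pvNorm stop == "FUTURE") = false ∨ u ≠ none := by
          by_cases hu : u = none
          · left; simp only [hu, true_and] at h2
            rw [not_or, not_or] at h2
            simp [h2.1, h2.2.1, h2.2.2]
          · right; exact hu
        rw [if_neg h1, if_neg h2]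
        by_cases hb : pvTruthyA (c, u).1 = true ∧ pvTruthyA (c, u).2 = true
        · rw [if_pos hb]
          obtain ⟨m, hm⟩ : ∃ m, c = some m := by
            cases c with
            | none => exact absurd hb.1 (by simp [pvTruthyA])
            | some m => exact ⟨m, rfl⟩
          obtain ⟨m', hm'⟩ : ∃ m', u = some m' := by
            cases u with
            | none => exact absurd hb.2 (by simp [pvTruthyA])
            | some m' => exact ⟨m', rfl⟩
          simp [hm, hm', Option.or]
        · rw [if_neg hb, ih]
          rcases hcur with hcur | hcur
          · rcases hup with hup | hup
            · rw [hcur, hup]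
            · obtain ⟨m', hm'⟩ : ∃ m', u = some m' := Option.ne_none_iff_exists'.mp hup
              rw [hcur]; simp [hm', Option.or]
          · obtain ⟨m, hm⟩ : ∃ m, c = some m := Option.ne_none_iff_exists'.mp hcur
            rcases hup with hup | hup
            · rw [hup]; simp [hm, Option.or]
            · obtain ⟨m', hm'⟩ : ∃ m', u = some m' := Option.ne_none_iff_exists'.mp hup
              simp [hm, hm', Option.or]

-- ===== VERDICT (by name: the statement is the Claim_ definition above) =====
theorem compute_stop_scope_py_spec : Claim_equal_compute_stop_scope_py := by
  intro stops _
  unfold Spec_compute_stop_scope_py compute_stop_scope_py compute_stop_scope_py_alt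
  rw [pvLoopA_eq]
  simp [Option.or]
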